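-- pv_equiv track=rewrite | github.com/wwg135/hermes-webui | api/routes.py | _cron_response_marker_index
-- ===== SOURCE A (Python) =====
-- def _cron_response_marker_index(text: str) -> int:
--     """Return the start index of a markdown Response heading, if present."""
--     candidates = []
--     for heading in ("## Response", "# Response"):
--         if text.startswith(heading):
--             candidates.append(0)
--         idx = text.find(f"\n{heading}")
--         if idx >= 0:
--             candidates.append(idx + 1)
--     return min(candidates) if candidates else -1
-- ===== SOURCE B (Python) =====
-- def _cron_response_marker_index(text: str) -> int:
--     offset = 0
--     rest = text
--     while True:
--         if rest.startswith(("## Response", "# Response")):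
--             return offset
--         nl = rest.find("\n")
--         if nl == -1:
--             return -1
--         offset += nl + 1
--         rest = rest[nl + 1:]
-- ===== Notes on version B (the rewrite author's own statement) =====
-- stated objective: alternative
-- what changed: Replaces the fixed probing (startswith on each heading plus a newline-prefixed substring find and a final min()) with a single forward scan over line starts that returns the offset of the first line beginning with either heading.
import Mathlib
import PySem

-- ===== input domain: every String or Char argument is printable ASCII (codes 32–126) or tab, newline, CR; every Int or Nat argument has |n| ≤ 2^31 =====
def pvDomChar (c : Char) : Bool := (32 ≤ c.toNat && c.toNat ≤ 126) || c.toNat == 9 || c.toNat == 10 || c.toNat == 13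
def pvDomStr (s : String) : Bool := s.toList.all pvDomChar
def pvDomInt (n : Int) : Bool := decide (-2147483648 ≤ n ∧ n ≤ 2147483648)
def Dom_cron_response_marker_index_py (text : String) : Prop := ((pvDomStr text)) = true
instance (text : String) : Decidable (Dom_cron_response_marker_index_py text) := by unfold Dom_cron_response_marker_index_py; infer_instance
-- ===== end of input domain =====

set_option maxHeartbeats 1000000

-- B replaces A's fixed startswith/find probing plus min() with a single forward scan over
-- line starts (objective: alternative decomposition, same O(n) cost).

-- ===== PORT A =====
-- A's loop body over the two headings; string ops are exact on .toList (f"\n{heading}" = '\n' :: heading.toList).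
def pvAStep (text : List Char) (cands : List Int) (heading : List Char) : List Int :=
  let cands := if PySem.Chars.startswith text heading then cands ++ [(0 : Int)] else cands
  let idx := PySem.Chars.find text ('\n' :: heading)
  if 0 ≤ idx then cands ++ [idx + 1] else cands

def pvA (text : List Char) : Int :=
  let candidates := ["## Response".toList, "# Response".toList].foldl (pvAStep text) []
  match PySem.List.min? candidates (fun x => x) with
  | some m => m          -- min(candidates)
  | none => -1           -- candidates empty

def cron_response_marker_index_py (text : String) : Int := pvA text.toList

-- ===== PORT B =====
-- B's while loop: rest is the remaining text, offset the index of its first character;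
-- rest[nl + 1:] is PySem.List.slice with nl + 1 ≥ 0.
def pvBGo (rest : List Char) (offset : Int) : Int :=
  if PySem.Chars.startswith rest "## Response".toList || PySem.Chars.startswith rest "# Response".toList then
    offset
  else
    let nl := PySem.Chars.find rest ['\n']
    if h : nl = -1 then -1
    else pvBGo (PySem.List.slice rest (some (nl + 1)) none) (offset + nl + 1)
termination_by rest.length
decreasing_by
  have h0 : -1 ≤ nl := PySem.Chars.neg_one_le_find rest ['\n']
  have h1 : (0:Int) ≤ nl := by omega
  have h2 : ['\n'] <:+: rest := (PySem.Chars.find_nonneg_iff rest ['\n']).1 h1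
  have h3 : rest ≠ [] := by
    rintro rfl
    simp at h2
  rw [PySem.List.slice_from rest (by omega : (0:Int) ≤ nl + 1)]
  have h4 : 1 ≤ (nl + 1).toNat := by omega
  have h5 : 0 < rest.length := List.length_pos_iff.mpr h3
  simp only [List.length_drop]
  omega

def cron_response_marker_index_py_alt (text : String) : Int := pvBGo text.toList 0

-- ===== PRECONDITION & SPEC =====
def Spec_cron_response_marker_index_py (text : String) (out : Int) : Prop := out = cron_response_marker_index_py_alt text
instance (text : String) (out : Int) : Decidable (Spec_cron_response_marker_index_py text out) := by unfold Spec_cron_response_marker_index_py; infer_instance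

-- ===== CLAIM (what is proved, stated in full; the proofs are below) =====
def Claim_equal_cron_response_marker_index_py : Prop := ∀ (text : String), Dom_cron_response_marker_index_py text → Spec_cron_response_marker_index_py text (cron_response_marker_index_py text)

-- ===== LEMMAS AND PROOFS =====

-- the value of A's candidate/min computation as a function of the two startswith flags and find results
def pvComb (b1 b2 : Bool) (F1 F2 : Int) : Int :=
  if b1 || b2 then 0
  else if 0 ≤ F1 then (if 0 ≤ F2 then (if F1 + 1 ≤ F2 + 1 then F1 + 1 else F2 + 1) else F1 + 1)
  else if 0 ≤ F2 then F2 + 1 else -1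

theorem pvMin0 : PySem.List.min? ([] : List Int) (fun v => v) = none := by
  simp [PySem.List.min?]

set_option maxHeartbeats 2000000 in
theorem pvA_gen (l h1 h2 : List Char) :
    (match PySem.List.min? ([h1, h2].foldl (pvAStep l) []) (fun x => x) with
      | some m => m
      | none => (-1 : Int))
      = pvComb (PySem.Chars.startswith l h1) (PySem.Chars.startswith l h2)
        (PySem.Chars.find l ('\n' :: h1)) (PySem.Chars.find l ('\n' :: h2)) := by
  have m1 := PySem.Chars.neg_one_le_find l ('\n' :: h1)
  have m2 := PySem.Chars.neg_one_le_find l ('\n' :: h2)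
  have hmatch : ∀ o : Option Int, (match o with | some m => m | none => (-1 : Int)) = o.getD (-1) := by
    intro o; cases o <;> rfl
  rw [hmatch]
  unfold pvAStep pvComb
  simp only [List.foldl]
  generalize hF1 : PySem.Chars.find l ('\n' :: h1) = F1 at m1 ⊢
  generalize hF2 : PySem.Chars.find l ('\n' :: h2) = F2 at m2 ⊢
  generalize hb1 : PySem.Chars.startswith l h1 = b1
  generalize hb2 : PySem.Chars.startswith l h2 = b2
  cases b1 <;> cases b2 <;>
    split_ifs <;>
    simp_all [PySem.List.min?_id_cons, pvMin0, Int.min_def] <;>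
    (try split_ifs) <;>
    omega

theorem pvA_eq_comb (l : List Char) :
    pvA l = pvComb (PySem.Chars.startswith l "## Response".toList)
      (PySem.Chars.startswith l "# Response".toList)
      (PySem.Chars.find l ('\n' :: "## Response".toList))
      (PySem.Chars.find l ('\n' :: "# Response".toList)) := by
  unfold pvA
  exact pvA_gen l "## Response".toList "# Response".toList

theorem pvComb_shift (b1 b2 : Bool) (f1 f2 nl : Int) (h1 : -1 ≤ f1) (h2 : -1 ≤ f2)
    (h0 : 0 ≤ nl) :
    pvComb false false (if b1 then nl else if f1 = -1 then -1 else nl + 1 + f1)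
      (if b2 then nl else if f2 = -1 then -1 else nl + 1 + f2)
      = if pvComb b1 b2 f1 f2 = -1 then -1 else nl + 1 + pvComb b1 b2 f1 f2 := by
  unfold pvComb
  cases b1 <;> cases b2 <;> simp only [Bool.false_or, Bool.true_or, Bool.or_self, if_true] <;>
    split_ifs <;> omega

theorem pv_char_prefix_get (c : Char) (h l : List Char) (i : Nat)
    (hp : (c :: h) <+: l.drop i) : l[i]? = some c := by
  obtain ⟨t, ht⟩ := hp
  rw [← List.head?_drop, ← ht]
  rfl

theorem pv_find_eq_of (s sub : List Char) (i : Nat) (hp : sub <+: s.drop i)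
    (hmin : ∀ j < i, ¬ sub <+: s.drop j) : PySem.Chars.find s sub = (i : Int) := by
  have hinf : sub <:+: s := hp.isInfix.trans (List.drop_suffix i s).isInfix
  have h0 : 0 ≤ PySem.Chars.find s sub := (PySem.Chars.find_nonneg_iff s sub).2 hinf
  obtain ⟨hfp, hfmin⟩ := PySem.Chars.find_spec h0
  have : (PySem.Chars.find s sub).toNat = i := by
    rcases Nat.lt_trichotomy (PySem.Chars.find s sub).toNat i with hlt | heq | hgt
    · exact absurd hfp (hmin _ hlt)
    · exact heq
    · exact absurd hp (hfmin _ hgt)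
  omega

theorem pv_no_nl_find (l h : List Char) (hn : '\n' ∉ l) :
    PySem.Chars.find l ('\n' :: h) = -1 := by
  rw [PySem.Chars.find_eq_neg_one_iff]
  intro hinf
  exact hn (hinf.sublist.mem (List.mem_cons_self))

theorem pv_head_ne (a r : List Char) (h : List Char) (ha : '\n' ∉ a) (j : Nat) (hj : j < a.length)
    (hp : ('\n' :: h) <+: List.drop j (a ++ '\n' :: r)) : False := by
  have hg := pv_char_prefix_get '\n' h (a ++ '\n' :: r) j hp
  rw [List.getElem?_append_left hj] at hg
  rw [List.getElem?_eq_getElem hj] at hg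
  have : a[j] = '\n' := by injection hg
  exact ha (this ▸ List.getElem_mem hj)

theorem pv_find_decomp (a r h : List Char) (ha : '\n' ∉ a) :
    PySem.Chars.find (a ++ '\n' :: r) ('\n' :: h) =
      if h <+: r then (a.length : Int)
      else if PySem.Chars.find r ('\n' :: h) = -1 then -1
      else a.length + 1 + PySem.Chars.find r ('\n' :: h) := by
  have hdl : List.drop a.length (a ++ '\n' :: r) = '\n' :: r := by
    simp
  split_ifs with hpr hneg
  · -- heading right after this first newline
    apply pv_find_eq_of
    · rw [hdl]
      exact List.cons_prefix_cons.2 ⟨rfl, hpr⟩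
    · intro j hj hp
      exact pv_head_ne a r h ha j hj hp
  · -- not found at all
    rw [PySem.Chars.find_eq_neg_one_iff]
    intro hinf
    obtain ⟨j, hp⟩ := (PySem.Chars.exists_prefix_drop_iff_isIn ('\n' :: h) _).2
      ((PySem.Chars.isIn_iff_infix _ _).2 hinf)
    rcases Nat.lt_trichotomy j a.length with hlt | heq | hgt
    · exact pv_head_ne a r h ha j hlt hp
    · subst heq
      rw [hdl] at hp
      exact hpr (List.cons_prefix_cons.1 hp).2
    · have hd2 : List.drop j (a ++ '\n' :: r) = List.drop (j - a.length - 1) r := by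
        rw [List.drop_append]
        rw [List.drop_eq_nil_of_le (by omega), List.nil_append]
        have : j - a.length = (j - a.length - 1) + 1 := by omega
        rw [this, List.drop_succ_cons]
        simp
      rw [hd2] at hp
      have : ('\n' :: h) <:+: r := hp.isInfix.trans (List.drop_suffix _ r).isInfix
      rw [PySem.Chars.find_eq_neg_one_iff] at hneg
      exact hneg this
  · -- found later: first occurrence in r, shifted
    have h0 : 0 ≤ PySem.Chars.find r ('\n' :: h) := by
      have := PySem.Chars.neg_one_le_find r ('\n' :: h)
      omega
    obtain ⟨hfp, hfmin⟩ := PySem.Chars.find_spec h0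
    set f : Nat := (PySem.Chars.find r ('\n' :: h)).toNat with hf
    have hd3 : ∀ k : Nat, List.drop (a.length + 1 + k) (a ++ '\n' :: r) = List.drop k r := by
      intro k
      rw [List.drop_append]
      rw [List.drop_eq_nil_of_le (by omega), List.nil_append]
      have : a.length + 1 + k - a.length = k + 1 := by omega
      rw [this, List.drop_succ_cons]
    have := pv_find_eq_of (a ++ '\n' :: r) ('\n' :: h) (a.length + 1 + f) ?_ ?_
    · rw [this]; push_cast; omega
    · rw [hd3]; exact hfp
    · intro j hj hp
      rcases Nat.lt_trichotomy j a.length with hlt | heq | hgt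
      · exact pv_head_ne a r h ha j hlt hp
      · subst heq
        rw [hdl] at hp
        exact hpr (List.cons_prefix_cons.1 hp).2
      · have hd2 : List.drop j (a ++ '\n' :: r) = List.drop (j - a.length - 1) r := by
          rw [List.drop_append]
          rw [List.drop_eq_nil_of_le (by omega), List.nil_append]
          have : j - a.length = (j - a.length - 1) + 1 := by omega
          rw [this, List.drop_succ_cons]
          simp
        rw [hd2] at hp
        exact hfmin _ (by omega) hp

theorem pv_nl_notmem (l : List Char) (h : PySem.Chars.find l ['\n'] = -1) : '\n' ∉ l := by
  rw [PySem.Chars.find_eq_neg_one_iff] at h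
  intro hm
  obtain ⟨s, t, rfl⟩ := List.append_of_mem hm
  exact h ⟨s, t, by simp⟩

theorem pv_nl_decomp (l : List Char) (h0 : 0 ≤ PySem.Chars.find l ['\n']) :
    let n := (PySem.Chars.find l ['\n']).toNat
    l = l.take n ++ '\n' :: l.drop (n + 1) ∧ '\n' ∉ l.take n ∧ n < l.length := by
  intro n
  obtain ⟨hp, hmin⟩ := PySem.Chars.find_spec h0
  have hg : l[n]? = some '\n' := pv_char_prefix_get '\n' [] l n hp
  have hlt : n < l.length := by
    by_contra hge
    rw [List.getElem?_eq_none_iff.mpr (by omega)] at hg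
    simp at hg
  have hge : l[n] = '\n' := by
    rw [List.getElem?_eq_getElem hlt] at hg
    injection hg
  refine ⟨?_, ?_, hlt⟩
  · conv_lhs => rw [← List.take_append_drop n l]
    rw [List.drop_eq_getElem_cons hlt, hge]
  · intro hm
    obtain ⟨i, hi, hie⟩ := List.mem_iff_getElem.mp hm
    have hilen : i < n := by
      simp [List.length_take] at hi
      omega
    have hil : i < l.length := by omega
    have : ['\n'] <+: l.drop i := by
      rw [List.drop_eq_getElem_cons hil]
      have hival : l[i] = '\n' := by
        rw [← hie]
        exact (List.getElem_take).symm
      rw [hival]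
      exact ⟨_, rfl⟩
    exact hmin i hilen this

theorem pvComb_ge (b1 b2 : Bool) (F1 F2 : Int) :
    -1 ≤ pvComb b1 b2 F1 F2 := by
  unfold pvComb
  split_ifs <;> omega

theorem pvBGo_eq : ∀ (n : Nat) (l : List Char), l.length ≤ n → ∀ (off : Int),
    pvBGo l off = if pvA l = -1 then -1 else off + pvA l := by
  intro n
  induction n with
  | zero =>
    intro l hl off
    have hnil : l = [] := List.eq_nil_of_length_eq_zero (by omega)
    subst hnil
    rw [pvBGo]
    rw [if_neg (by decide : ¬ ((PySem.Chars.startswith [] "## Response".toList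
      || PySem.Chars.startswith [] "# Response".toList) = true))]
    rw [dif_pos (by decide : PySem.Chars.find [] ['\n'] = -1)]
    have hA : pvA [] = -1 := by decide
    rw [hA]
    norm_num
  | succ n ih =>
    intro l hl off
    rw [pvBGo]
    by_cases hH : (PySem.Chars.startswith l "## Response".toList
        || PySem.Chars.startswith l "# Response".toList) = true
    · rw [if_pos hH]
      have hA : pvA l = 0 := by
        rw [pvA_eq_comb]
        unfold pvComb
        rw [if_pos hH]
      rw [hA]
      norm_num
    · rw [if_neg hH]
      have hb : PySem.Chars.startswith l "## Response".toList = false ∧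
          PySem.Chars.startswith l "# Response".toList = false := by
        constructor <;> revert hH <;> cases PySem.Chars.startswith l "## Response".toList <;>
          cases PySem.Chars.startswith l "# Response".toList <;> simp
      by_cases hnl : PySem.Chars.find l ['\n'] = -1
      · rw [dif_pos hnl]
        have hmem := pv_nl_notmem l hnl
        have hA : pvA l = -1 := by
          rw [pvA_eq_comb, hb.1, hb.2, pv_no_nl_find l _ hmem, pv_no_nl_find l _ hmem]
          unfold pvComb
          norm_num
        rw [hA]
        norm_num
      · rw [dif_neg hnl]
        have h0 : 0 ≤ PySem.Chars.find l ['\n'] := by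
          have := PySem.Chars.neg_one_le_find l ['\n']
          omega
        obtain ⟨hdec, hna, hlen⟩ := pv_nl_decomp l h0
        set nl := PySem.Chars.find l ['\n'] with hnldef
        set a := l.take nl.toNat with hadef
        set r := l.drop (nl.toNat + 1) with hrdef
        have halen : (a.length : Int) = nl := by
          rw [hadef]
          simp [List.length_take]
          omega
        -- the recursive argument is r
        rw [PySem.List.slice_from l (by omega : (0:Int) ≤ nl + 1)]
        have htonat : (nl + 1).toNat = nl.toNat + 1 := by omega
        rw [htonat]
        have hrlen : r.length ≤ n := by
          rw [hrdef]
          simp [List.length_drop]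
          omega
        rw [ih r hrlen (off + nl + 1)]
        -- find decompositions for both headings
        have hd1 := pv_find_decomp a r "## Response".toList hna
        have hd2 := pv_find_decomp a r "# Response".toList hna
        have hF1 : PySem.Chars.find l ('\n' :: "## Response".toList) =
            if PySem.Chars.startswith r "## Response".toList then nl
            else if PySem.Chars.find r ('\n' :: "## Response".toList) = -1 then -1
            else nl + 1 + PySem.Chars.find r ('\n' :: "## Response".toList) := by
          rw [hdec] at *
          rw [hd1, halen]
          by_cases hpr : "## Response".toList <+: r
          · rw [if_pos hpr, if_pos ((PySem.Chars.startswith_iff r _).mpr hpr)]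
          · have hsw : PySem.Chars.startswith r "## Response".toList = false := by
              rw [Bool.eq_false_iff, ne_eq, PySem.Chars.startswith_iff]
              exact hpr
            rw [if_neg hpr]
            simp only [hsw, Bool.false_eq_true, if_false]
        have hF2 : PySem.Chars.find l ('\n' :: "# Response".toList) =
            if PySem.Chars.startswith r "# Response".toList then nl
            else if PySem.Chars.find r ('\n' :: "# Response".toList) = -1 then -1
            else nl + 1 + PySem.Chars.find r ('\n' :: "# Response".toList) := by
          rw [hdec] at *
          rw [hd2, halen]
          by_cases hpr : "# Response".toList <+: r
          · rw [if_pos hpr, if_pos ((PySem.Chars.startswith_iff r _).mpr hpr)]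
          · have hsw : PySem.Chars.startswith r "# Response".toList = false := by
              rw [Bool.eq_false_iff, ne_eq, PySem.Chars.startswith_iff]
              exact hpr
            rw [if_neg hpr]
            simp only [hsw, Bool.false_eq_true, if_false]
        have hAl : pvA l = pvComb false false
            (PySem.Chars.find l ('\n' :: "## Response".toList))
            (PySem.Chars.find l ('\n' :: "# Response".toList)) := by
          rw [pvA_eq_comb, hb.1, hb.2]
        rw [hAl, hF1, hF2, pvA_eq_comb r]
        rw [pvComb_shift _ _ _ _ nl (PySem.Chars.neg_one_le_find r _)
          (PySem.Chars.neg_one_le_find r _) h0]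
        have hge := pvComb_ge (PySem.Chars.startswith r "## Response".toList)
          (PySem.Chars.startswith r "# Response".toList)
          (PySem.Chars.find r ('\n' :: "## Response".toList))
          (PySem.Chars.find r ('\n' :: "# Response".toList))
        split_ifs <;> omega


-- ===== VERDICT (by name: the statement is the Claim_ definition above) =====
theorem cron_response_marker_index_py_spec : Claim_equal_cron_response_marker_index_py := by
  intro text _
  unfold Spec_cron_response_marker_index_py cron_response_marker_index_py cron_response_marker_index_py_alt
  rw [pvBGo_eq text.toList.length text.toList le_rfl 0]
  split <;> omega
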